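-- pv_equiv track=rewrite | github.com/inergoul/boostcamp_peer_session | coding_test/pass_42577_전화번호목록/solution_jo-member.py | solution
-- ===== SOURCE A (Python) =====
-- from collections import deque
--
-- def solution(pb):
--     '''
--     전화번호 목록을 sort해준뒤 deque로 만들어준다.
--     이후 dq의 길이가 1이 되기 전까지
--     popleft를하여 길이가 짧은 순으로 문자열을 뽑아낸다음 남은 dq를 순회하며 뽑아낸 문자열이 남은 dq에 있는지 확인
--     1개가 남을때 까지 popleft하였는데 없을때는 True를 return
--     pop한
--     '''
--
--     pb.sort()
--     dq = deque(pb)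
--     while len(dq)!=1:
--         w = dq.popleft()
--         for num in dq:
--             if w in num:
--                 return False
--     return True
-- ===== SOURCE B (Python) =====
-- def solution(pb):
--     pb.sort()
--     seen = set()
--     for num in pb:
--         n = len(num)
--         for i in range(n + 1):
--             for j in range(i, n + 1):
--                 if num[i:j] in seen:
--                     return False
--         seen.add(num)
--     return True
-- ===== Notes on version B (the rewrite author's own statement) =====
-- stated objective: alternative
-- what changed: A pops each sorted string and scans all later strings with 'w in num'; B makes one pass over the sorted list keeping a hash set of earlier strings and looks up each string's substrings in it, so the pairwise scan over later strings disappears (trades O(n^2) string scans for O(L^2) set lookups per string).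
-- outside the precondition, e.g. on solution([]): A raises IndexError, B returns True
import Mathlib
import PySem

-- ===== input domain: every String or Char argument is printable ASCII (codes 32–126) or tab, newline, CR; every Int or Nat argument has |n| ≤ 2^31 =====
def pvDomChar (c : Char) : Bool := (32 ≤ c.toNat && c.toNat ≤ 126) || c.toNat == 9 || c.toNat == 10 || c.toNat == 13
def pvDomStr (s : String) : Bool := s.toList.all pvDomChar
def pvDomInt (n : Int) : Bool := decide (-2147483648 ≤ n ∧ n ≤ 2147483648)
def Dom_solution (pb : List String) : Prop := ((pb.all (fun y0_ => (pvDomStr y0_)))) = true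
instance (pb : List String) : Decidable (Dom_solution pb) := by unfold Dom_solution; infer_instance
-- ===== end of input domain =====

-- B replaces A's pairwise scan of all later strings by one pass with a hash set: each
-- string's substrings are looked up in the set of sorted-earlier strings. Both A and B sort
-- pb in place (caller-visible mutation identical); the equivalence proved is about the return value.

-- ===== PORT A =====
-- while len(dq)!=1: w = dq.popleft(); for num in dq: if w in num: return False
-- ([] case unreachable under Pre_solution: Python raises IndexError there)
def solLoopA : List String → Bool
  | [] => true
  | w :: rest => if rest.any (fun num => PySem.Str.isIn w num) then false else solLoopA rest

def solution (pb : List String) : Bool :=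
  solLoopA (PySem.List.sorted pb (fun x => x) false)

-- ===== PORT B =====
-- for i in range(n+1): for j in range(i, n+1): if num[i:j] in seen: return False
def solHasSub (seen : PySem.Set String) (num : String) : Bool :=
  (PySem.List.pyRange 0 ((PySem.Str.len num : Int) + 1) 1).any (fun i =>
    (PySem.List.pyRange i ((PySem.Str.len num : Int) + 1) 1).any (fun j =>
      PySem.Set.contains seen (PySem.Str.slice num (some i) (some j))))

def solLoopB (seen : PySem.Set String) : List String → Bool
  | [] => true
  | num :: rest =>
      if solHasSub seen num then false else solLoopB (PySem.Set.add seen num) rest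

def solution_alt (pb : List String) : Bool :=
  solLoopB PySem.Set.empty (PySem.List.sorted pb (fun x => x) false)

-- ===== PRECONDITION & SPEC =====
-- Pre_ excludes only the empty list, on which A raises IndexError (popleft from empty deque).
def Pre_solution (pb : List String) : Prop := pb ≠ []
instance (pb : List String) : Decidable (Pre_solution pb) := by unfold Pre_solution; infer_instance
def pvWitness_solution : List String := ["12", "3"]

def Spec_solution (pb : List String) (out : Bool) : Prop := out = solution_alt pb
instance (pb : List String) (out : Bool) : Decidable (Spec_solution pb out) := by unfold Spec_solution; infer_instance

-- ===== CLAIM (what is proved, stated in full; the proofs are below) =====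
def Claim_equal_solution : Prop := ∀ (pb : List String), Dom_solution pb → Pre_solution pb → Spec_solution pb (solution pb)

-- ===== LEMMAS AND PROOFS =====

-- A's loop accepts exactly the lists in which no element is a substring of a later one.
theorem solLoopA_true_iff (l : List String) :
    solLoopA l = true ↔ l.Pairwise (fun a b => PySem.Str.isIn a b = false) := by
  induction l with
  | nil => simp [solLoopA]
  | cons w rest ih =>
      simp only [solLoopA, List.pairwise_cons]
      by_cases h : rest.any (fun num => PySem.Str.isIn w num) = true
      · rw [if_pos h]
        constructor
        · intro hf; cases hf
        · rintro ⟨hall, -⟩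
          obtain ⟨num, hmem, hin⟩ := List.any_eq_true.mp h
          rw [hall num hmem] at hin; cases hin
      · rw [if_neg h, ih]
        have h' : ∀ num ∈ rest, PySem.Str.isIn w num = false := by
          intro num hm
          by_contra hne
          exact h (List.any_eq_true.mpr ⟨num, hm, by simpa using hne⟩)
        constructor
        · intro hr; exact ⟨h', hr⟩
        · rintro ⟨-, hr⟩; exact hr

-- B's inner double loop finds a set member iff some member is a substring of num.
theorem solHasSub_true_iff (seen : PySem.Set String) (num : String) :
    solHasSub seen num = true ↔ ∃ w ∈ seen, PySem.Str.isIn w num = true := by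
  unfold solHasSub
  simp only [List.any_eq_true, PySem.List.mem_pyRange_one]
  constructor
  · rintro ⟨i, ⟨hi0, hin⟩, j, ⟨hij, hjn⟩, hc⟩
    refine ⟨PySem.Str.slice num (some i) (some j), (PySem.Set.contains_iff _ _).mp hc, ?_⟩
    rw [PySem.Str.isIn_iff_infix]
    have hls : (PySem.Str.slice num (some i) (some j)).toList
        = PySem.List.slice num.toList (some i) (some j) := by
      simp [PySem.Str.toList_slice, PySem.Chars.slice_eq_listSlice]
    rw [hls, PySem.List.slice_toNat]
    · exact (List.take_prefix _ _).isInfix.trans (List.drop_suffix _ _).isInfix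
    · exact hi0
    · exact le_trans hi0 hij
  · rintro ⟨w, hw, hin⟩
    rw [PySem.Str.isIn_iff_infix] at hin
    obtain ⟨s, t, hst⟩ := hin
    have hlen : s.length + w.toList.length + t.length = num.toList.length := by
      rw [← hst]; simp; omega
    have hn : (PySem.Str.len num : Int) = (num.toList.length : Int) := by
      simp [pysem]
    refine ⟨(s.length : Int), ⟨by positivity, by rw [hn]; omega⟩,
      (s.length : Int) + (w.toList.length : Int),
      ⟨by omega, by rw [hn]; omega⟩, ?_⟩
    rw [PySem.Set.contains_iff]
    have hsl : PySem.Str.slice num (some (s.length : Int))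
        (some ((s.length : Int) + (w.toList.length : Int))) = w := by
      apply String.toList_inj.mp
      have hls : (PySem.Str.slice num (some (s.length : Int))
          (some ((s.length : Int) + (w.toList.length : Int)))).toList
          = PySem.List.slice num.toList (some (s.length : Int))
            (some ((s.length : Int) + (w.toList.length : Int))) := by
        simp [PySem.Str.toList_slice, PySem.Chars.slice_eq_listSlice]
      rw [hls, PySem.List.slice_natCast_add]
      have hnum : num.toList = s ++ (w.toList ++ t) := by rw [← hst]; simp
      rw [hnum, List.drop_left, List.take_left]
    rw [hsl]; exact hw

-- B's outer loop: true iff nothing in seen is a substring of any element and the list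
-- itself has no earlier-substring-of-later pair.
theorem solLoopB_true_iff (l : List String) (seen : PySem.Set String) :
    solLoopB seen l = true ↔
      (∀ y ∈ l, ∀ w ∈ seen, PySem.Str.isIn w y = false) ∧
        l.Pairwise (fun a b => PySem.Str.isIn a b = false) := by
  induction l generalizing seen with
  | nil => simp [solLoopB]
  | cons num rest ih =>
      simp only [solLoopB]
      by_cases h : solHasSub seen num = true
      · rw [if_pos h]
        obtain ⟨w, hw, hin⟩ := (solHasSub_true_iff seen num).mp h
        constructor
        · intro hf; cases hf
        · rintro ⟨hall, -⟩
          rw [hall num (by simp) w hw] at hin; cases hin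
      · rw [if_neg h, ih, List.pairwise_cons]
        have hnone : ∀ w ∈ seen, PySem.Str.isIn w num = false := by
          intro w hw
          by_contra hne
          exact h ((solHasSub_true_iff seen num).mpr ⟨w, hw, by simpa using hne⟩)
        constructor
        · rintro ⟨h1, h2⟩
          refine ⟨?_, ?_, h2⟩
          · intro y hy
            rcases List.mem_cons.mp hy with rfl | hy'
            · exact hnone
            · intro w hw; exact h1 y hy' w (by simp [PySem.Set.mem_add, hw])
          · intro b hb
            exact h1 b hb num (by simp [PySem.Set.mem_add])
        · rintro ⟨h1, h2, h3⟩
          refine ⟨?_, h3⟩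
          intro y hy w hw
          rcases (PySem.Set.mem_add _ _ _).mp hw with hw' | rfl
          · exact h1 y (by simp [hy]) w hw'
          · exact h2 y hy

-- ===== VERDICT (by name: the statement is the Claim_ definition above) =====
theorem solution_spec : Claim_equal_solution := by
  intro pb _ _
  unfold Spec_solution solution solution_alt
  rw [Bool.eq_iff_iff, solLoopA_true_iff, solLoopB_true_iff]
  constructor
  · intro h
    refine ⟨?_, h⟩
    intro y _ w hw
    simp [PySem.Set.empty] at hw
  · rintro ⟨-, h⟩; exact h
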